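-- pv_equiv track=rewrite | github.com/pypi-data/pypi-mirror-403 | packages/dexray-insight/dexray_insight-1.0.0.3-py3-none-any.whl/dexray_insight/modules/string_analysis/filters/network_filter.py | _split_concatenated_urls
-- ===== SOURCE A (Python) =====
-- def _split_concatenated_urls(string: str) -> list[str]:
--     """
--     Split concatenated URLs into individual URLs.
--
--     Args:
--         string: String containing multiple URLs
--
--     Returns:
--         List of individual URLs
--     """
--     urls = []
--
--     # Split by common separators
--     separators = [",", ";", " ", "|"]
--
--     # Start with the original string
--     parts = [string]
--
--     # Split by each separator
--     for separator in separators: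
--         new_parts = []
--         for part in parts:
--             new_parts.extend(part.split(separator))
--         parts = new_parts
--
--     # Filter parts that look like URLs
--     for part in parts:
--         part = part.strip()
--         if part and ("://" in part):
--             urls.append(part)
--
--     return urls
-- ===== SOURCE B (Python) =====
-- def _flush(buf: list, urls: list) -> None:
--     token = "".join(buf).strip()
--     buf.clear()
--     if token and ("://" in token):
--         urls.append(token)
--
--
-- def _split_concatenated_urls(string: str) -> list[str]:
--     """Single left-to-right scan: accumulate a token, flush at each separator
--     (',', ';', ' ', '|') and at the end; keep stripped tokens containing '://'."""
--     urls: list[str] = []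
--     buf: list = []
--     for ch in string:
--         if ch in {",", ";", " ", "|"}:
--             _flush(buf, urls)
--         else:
--             buf.append(ch)
--     _flush(buf, urls)
--     return urls
-- ===== Notes on version B (the rewrite author's own statement) =====
-- stated objective: alternative
-- what changed: Replaced the four sequential whole-string split passes (one per separator) with a single left-to-right character scan that accumulates a token buffer and flushes it at each separator and at the end, applying the strip-and-'://' filter at flush time.
import Mathlib
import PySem

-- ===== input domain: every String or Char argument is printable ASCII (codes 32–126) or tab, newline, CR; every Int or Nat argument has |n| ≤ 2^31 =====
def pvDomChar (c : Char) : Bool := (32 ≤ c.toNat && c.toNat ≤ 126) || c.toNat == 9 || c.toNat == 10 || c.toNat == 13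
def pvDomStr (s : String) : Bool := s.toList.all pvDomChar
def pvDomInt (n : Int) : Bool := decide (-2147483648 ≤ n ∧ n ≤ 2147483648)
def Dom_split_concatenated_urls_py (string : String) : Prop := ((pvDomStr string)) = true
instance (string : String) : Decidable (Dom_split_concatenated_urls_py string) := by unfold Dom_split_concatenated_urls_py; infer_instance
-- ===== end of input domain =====

-- B replaces A's four sequential separator-split passes by one left-to-right scan with a
-- token buffer flushed at each separator; same return value (alternative decomposition, not faster).

-- ===== PORT A =====
-- Literal transliteration of A: four sequential splits, then the strip-and-'://' filter loop.
def split_concatenated_urls_py (string : String) : List String :=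
  let separators : List (List Char) := [[','], [';'], [' '], ['|']]
  let parts :=
    separators.foldl
      (fun parts sep => parts.foldl (fun newParts part => newParts ++ PySem.Chars.splitOn part sep) [])
      [string.toList]
  parts.foldl
    (fun urls part =>
      let token := PySem.Chars.strip part
      if (!token.isEmpty) && PySem.Chars.isIn ("://".toList) token then urls ++ [String.ofList token]
      else urls)
    []

-- ===== PORT B =====
-- Transliteration of Source B's `_flush`: strip the buffer, keep it if non-empty and containing "://".
def pvFlush (urls : List String) (buf : List Char) : List String :=
  let token := PySem.Chars.strip buf
  if (!token.isEmpty) && PySem.Chars.isIn ("://".toList) token then urls ++ [String.ofList token]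
  else urls

-- Transliteration of Source B's scan loop; `ch in {",", ";", " ", "|"}` is the 4-way comparison
-- (exact: membership of one char in a 4-char literal set).
def pvAltGo (urls : List String) (buf : List Char) : List Char → List String
  | [] => pvFlush urls buf
  | c :: rest =>
      if c == ',' || c == ';' || c == ' ' || c == '|' then pvAltGo (pvFlush urls buf) [] rest
      else pvAltGo urls (buf ++ [c]) rest

def split_concatenated_urls_py_alt (string : String) : List String :=
  pvAltGo [] [] string.toList

-- ===== PRECONDITION & SPEC =====
def Spec_split_concatenated_urls_py (string : String) (out : List String) : Prop := out = split_concatenated_urls_py_alt string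
instance (string : String) (out : List String) : Decidable (Spec_split_concatenated_urls_py string out) := by unfold Spec_split_concatenated_urls_py; infer_instance

-- ===== CLAIM (what is proved, stated in full; the proofs are below) =====
def Claim_equal_split_concatenated_urls_py : Prop := ∀ (string : String), Dom_split_concatenated_urls_py string → Spec_split_concatenated_urls_py string (split_concatenated_urls_py string)

-- ===== LEMMAS AND PROOFS =====

-- Split on a character predicate, keeping empty tokens (proof-side model of both programs).
def pvConsHead (pre : List Char) : List (List Char) → List (List Char)
  | [] => [pre]
  | t :: ts => (pre ++ t) :: ts

def pvSplit (p : Char → Bool) : List Char → List (List Char)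
  | [] => [[]]
  | c :: rest => if p c then [] :: pvSplit p rest else pvConsHead [c] (pvSplit p rest)

theorem pvSplit_ne_nil (p : Char → Bool) (l : List Char) : pvSplit p l ≠ [] := by
  cases l with
  | nil => simp [pvSplit]
  | cons c rest =>
      simp only [pvSplit]
      split
      · simp
      · cases h : pvSplit p rest <;> simp [pvConsHead]

theorem pvSplit_exists_cons (p : Char → Bool) (l : List Char) :
    ∃ t ts, pvSplit p l = t :: ts := by
  rcases h : pvSplit p l with _ | ⟨t, ts⟩
  · exact absurd h (pvSplit_ne_nil p l)
  · exact ⟨t, ts, rfl⟩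

theorem pvConsHead_nil {ls : List (List Char)} (h : ls ≠ []) : pvConsHead [] ls = ls := by
  cases ls with
  | nil => exact absurd rfl h
  | cons t ts => simp [pvConsHead]

theorem pvConsHead_consHead (a b : List Char) (ls : List (List Char)) :
    pvConsHead a (pvConsHead b ls) = pvConsHead (a ++ b) ls := by
  cases ls <;> simp [pvConsHead]

theorem pvConsHead_append_left (pre : List Char) {xs : List (List Char)} (ys : List (List Char))
    (h : xs ≠ []) : pvConsHead pre xs ++ ys = pvConsHead pre (xs ++ ys) := by
  cases xs with
  | nil => exact absurd rfl h
  | cons t ts => simp [pvConsHead]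

-- splitOn with a single-character separator is pvSplit on equality with that character.
theorem pvGo_single (c : Char) : ∀ (fuel : Nat) (l cur : List Char) (acc : List (List Char)),
    l.length ≤ fuel →
    PySem.Chars.splitOn.go [c] fuel l cur acc = acc.reverse ++ pvConsHead cur.reverse (pvSplit (· == c) l) := by
  intro fuel
  induction fuel with
  | zero =>
      intro l cur acc hl
      have hnil : l = [] := List.length_eq_zero_iff.mp (Nat.le_zero.mp hl)
      subst hnil
      simp [PySem.Chars.splitOn.go, pvSplit, pvConsHead]
  | succ fuel ih =>
      intro l cur acc hl
      cases l with
      | nil => simp [PySem.Chars.splitOn.go, pvSplit, pvConsHead]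
      | cons ch rest =>
          have hrest : rest.length ≤ fuel := by simpa using hl
          by_cases hc : ch = c
          · subst hc
            have hpre : [ch].isPrefixOf (ch :: rest) = true := by simp [List.isPrefixOf]
            rw [PySem.Chars.splitOn.go, if_pos hpre]
            simp only [List.length_singleton, List.drop_one, List.tail_cons]
            rw [ih rest [] (cur.reverse :: acc) hrest]
            obtain ⟨t, ts, hms⟩ := pvSplit_exists_cons (· == ch) rest
            simp [pvSplit, pvConsHead, hms]
          · have hpre : [c].isPrefixOf (ch :: rest) = false := by
              simp [List.isPrefixOf]
              exact fun h => absurd h.symm hc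
            rw [PySem.Chars.splitOn.go, if_neg (by simp [hpre])]
            rw [ih rest (ch :: cur) acc hrest]
            have h1 : pvSplit (· == c) (ch :: rest) = pvConsHead [ch] (pvSplit (· == c) rest) := by
              simp [pvSplit, hc]
            rw [h1, pvConsHead_consHead]
            simp

theorem pvSplitOn_single (c : Char) (l : List Char) :
    PySem.Chars.splitOn l [c] = pvSplit (· == c) l := by
  unfold PySem.Chars.splitOn
  rw [pvGo_single c (l.length + 1) l [] [] (by omega)]
  simp [pvConsHead_nil (pvSplit_ne_nil _ _)]

-- Re-splitting every token by q is splitting once on (p or q).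
theorem pvSplit_flatMap (p q : Char → Bool) (l : List Char) :
    (pvSplit p l).flatMap (pvSplit q) = pvSplit (fun c => p c || q c) l := by
  induction l with
  | nil => simp [pvSplit]
  | cons ch rest ih =>
      by_cases hp : p ch
      · simp [pvSplit, hp, ih]
      · obtain ⟨t, ts, hms⟩ := pvSplit_exists_cons p rest
        have h1 : pvSplit p (ch :: rest) = (ch :: t) :: ts := by
          simp [pvSplit, hp, hms, pvConsHead]
        by_cases hq : q ch
        · have h2 : pvSplit q (ch :: t) = [] :: pvSplit q t := by simp [pvSplit, hq]
          have h3 : pvSplit (fun c => p c || q c) (ch :: rest) =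
              [] :: pvSplit (fun c => p c || q c) rest := by
            simp [pvSplit, hp, hq]
          rw [h1, List.flatMap_cons, h2, h3, List.cons_append]
          rw [← ih, hms, List.flatMap_cons]
        · have h2 : pvSplit q (ch :: t) = pvConsHead [ch] (pvSplit q t) := by
            simp [pvSplit, hq]
          have h3 : pvSplit (fun c => p c || q c) (ch :: rest) =
              pvConsHead [ch] (pvSplit (fun c => p c || q c) rest) := by
            simp [pvSplit, hp, hq]
          rw [h1, List.flatMap_cons, h2, h3,
              pvConsHead_append_left [ch] (ts.flatMap (pvSplit q)) (pvSplit_ne_nil q t),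
              ← List.flatMap_cons, ← hms, ih]

theorem pvSplit_congr {p q : Char → Bool} (h : ∀ c, p c = q c) :
    ∀ l, pvSplit p l = pvSplit q l := by
  intro l
  induction l with
  | nil => simp [pvSplit]
  | cons c rest ih => simp [pvSplit, h c, ih]

-- B's scan equals the flush-fold over pvSplit, with the pending buffer glued onto the first token.
theorem pvAltGo_eq (l : List Char) : ∀ (urls : List String) (buf : List Char),
    pvAltGo urls buf l =
      List.foldl pvFlush urls
        (pvConsHead buf (pvSplit (fun c => c == ',' || c == ';' || c == ' ' || c == '|') l)) := by
  induction l with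
  | nil => intro urls buf; simp [pvAltGo, pvSplit, pvConsHead]
  | cons c rest ih =>
      intro urls buf
      by_cases hc : (c == ',' || c == ';' || c == ' ' || c == '|') = true
      · simp only [pvAltGo, pvSplit, hc]
        rw [ih (pvFlush urls buf) []]
        rw [pvConsHead_nil (pvSplit_ne_nil _ _)]
        simp [pvConsHead]
      · simp only [pvAltGo, pvSplit, if_neg hc]
        rw [ih urls (buf ++ [c]), pvConsHead_consHead]

-- ===== VERDICT (by name: the statement is the Claim_ definition above) =====
theorem split_concatenated_urls_py_spec : Claim_equal_split_concatenated_urls_py := by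
  intro s _
  unfold Spec_split_concatenated_urls_py split_concatenated_urls_py split_concatenated_urls_py_alt
  rw [pvAltGo_eq, pvConsHead_nil (pvSplit_ne_nil _ _)]
  dsimp only
  simp only [List.foldl_cons, List.foldl_nil]
  simp only [PySem.List.foldl_append_eq_flatMap, List.nil_append]
  rw [pvSplitOn_single]
  simp only [pvSplitOn_single]
  rw [pvSplit_flatMap, pvSplit_flatMap, pvSplit_flatMap]
  rw [pvSplit_congr (q := fun c => c == ',' || c == ';' || c == ' ' || c == '|')
        (fun c => by simp [Bool.or_assoc]) s.toList]
  rfl
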